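-- pv_equiv track=rewrite | github.com/pypi-data/pypi-mirror-403 | packages/cyntrisec/cyntrisec-0.1.9.tar.gz/cyntrisec-0.1.9/src/cyntrisec/core/compliance.py | _assets_impacted_by_errors
-- ===== SOURCE A (Python) =====
-- def _assets_impacted_by_errors(
--     required_assets: list[str],
--     error_services: set[str],
-- ) -> set[str]:
--     """Map collection errors to affected control services."""
--     impacted: set[str] = set()
--     for service in error_services:
--         if service == "iam" and any(a.startswith("iam:") for a in required_assets):
--             impacted.add(service)
--         if service == "s3" and any(a.startswith("s3:") for a in required_assets):
--             impacted.add(service)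
--         if service in {"ec2", "network"} and any(a.startswith("ec2:") for a in required_assets):
--             impacted.add(service)
--         if service == "lambda" and any(a.startswith("lambda:") for a in required_assets):
--             impacted.add(service)
--         if service == "rds" and any(a.startswith("rds:") for a in required_assets):
--             impacted.add(service)
--     return impacted
-- ===== SOURCE B (Python) =====
-- _SERVICE_PREFIX = {
--     "iam": "iam:",
--     "s3": "s3:",
--     "ec2": "ec2:",
--     "network": "ec2:",
--     "lambda": "lambda:",
--     "rds": "rds:",
-- }
--
--
-- def _assets_impacted_by_errors(
--     required_assets: list[str],
--     error_services: set[str],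
-- ) -> set[str]:
--     """Map collection errors to affected control services."""
--     present = {a[: a.find(":") + 1] for a in required_assets if ":" in a}
--     return {s for s in error_services if _SERVICE_PREFIX.get(s, "") in present}
-- ===== Notes on version B (the rewrite author's own statement) =====
-- stated objective: simpler
-- what changed: Replaces the five hardcoded service==...and any(startswith) branches by a static service-to-prefix table plus a single pass that collects the set of first-colon prefixes present in required_assets, then one table lookup per error service.
import Mathlib
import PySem

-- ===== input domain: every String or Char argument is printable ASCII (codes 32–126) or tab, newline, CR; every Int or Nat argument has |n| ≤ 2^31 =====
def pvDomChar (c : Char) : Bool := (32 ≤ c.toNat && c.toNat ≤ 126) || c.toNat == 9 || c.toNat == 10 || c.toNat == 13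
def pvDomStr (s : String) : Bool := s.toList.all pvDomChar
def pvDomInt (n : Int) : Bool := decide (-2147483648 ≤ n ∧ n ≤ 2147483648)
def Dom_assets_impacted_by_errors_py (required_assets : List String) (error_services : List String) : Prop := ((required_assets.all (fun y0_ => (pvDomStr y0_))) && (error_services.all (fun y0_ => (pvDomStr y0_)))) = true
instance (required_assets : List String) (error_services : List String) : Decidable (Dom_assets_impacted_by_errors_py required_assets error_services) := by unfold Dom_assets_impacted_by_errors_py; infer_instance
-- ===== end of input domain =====

-- B replaces A's five hardcoded startswith scans by a static service→prefix table plus a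
-- one-pass set of the asset prefixes actually present (objective: simpler, table-driven).


-- ===== PORT A =====
def assets_impacted_by_errors_py (required_assets : List String) (error_services : List String) : List String :=
  error_services.foldl (fun impacted service =>
    let impacted := if service == "iam" && required_assets.any (fun a => PySem.Str.startswith a "iam:") then PySem.Set.add impacted service else impacted
    let impacted := if service == "s3" && required_assets.any (fun a => PySem.Str.startswith a "s3:") then PySem.Set.add impacted service else impacted
    let impacted := if (service == "ec2" || service == "network") && required_assets.any (fun a => PySem.Str.startswith a "ec2:") then PySem.Set.add impacted service else impacted
    let impacted := if service == "lambda" && required_assets.any (fun a => PySem.Str.startswith a "lambda:") then PySem.Set.add impacted service else impacted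
    let impacted := if service == "rds" && required_assets.any (fun a => PySem.Str.startswith a "rds:") then PySem.Set.add impacted service else impacted
    impacted) PySem.Set.empty

-- ===== PORT B =====
def pvServicePrefix : PySem.Dict String String :=
  ⟨[("iam", "iam:"), ("s3", "s3:"), ("ec2", "ec2:"), ("network", "ec2:"), ("lambda", "lambda:"), ("rds", "rds:")]⟩

-- a[: a.find(":") + 1]
def pvPref (a : String) : String := PySem.Str.slice a none (some (PySem.Str.find a ":" + 1))

def pvPresentPrefixes (required_assets : List String) : PySem.Set String :=
  required_assets.foldl (fun pres a =>
    if PySem.Str.isIn ":" a then PySem.Set.add pres (pvPref a) else pres) PySem.Set.empty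

def assets_impacted_by_errors_py_alt (required_assets : List String) (error_services : List String) : List String :=
  let present := pvPresentPrefixes required_assets
  error_services.foldl (fun out s =>
    if PySem.Set.contains present (pvServicePrefix.getD s "") then PySem.Set.add out s else out)
    PySem.Set.empty

-- ===== PRECONDITION & SPEC =====
def Spec_assets_impacted_by_errors_py (required_assets : List String) (error_services : List String) (out : List String) : Prop := out = assets_impacted_by_errors_py_alt required_assets error_services
instance (required_assets : List String) (error_services : List String) (out : List String) : Decidable (Spec_assets_impacted_by_errors_py required_assets error_services out) := by unfold Spec_assets_impacted_by_errors_py; infer_instance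

-- ===== CLAIM (what is proved, stated in full; the proofs are below) =====
def Claim_equal_assets_impacted_by_errors_py : Prop := ∀ (required_assets : List String) (error_services : List String), Dom_assets_impacted_by_errors_py required_assets error_services → Spec_assets_impacted_by_errors_py required_assets error_services (assets_impacted_by_errors_py required_assets error_services)

-- ===== LEMMAS AND PROOFS =====

-- char-level core: for a pattern cs ++ [':'] whose body cs has no colon, "the string has a colon
-- and its slice up to and including the first colon equals the pattern" is exactly "the string
-- starts with the pattern"
lemma pvPref_eq_iff (cs : List Char) (hc : ':' ∉ cs) (l : List Char) :
    (PySem.Chars.isIn [':'] l = true ∧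
      PySem.Chars.slice l none (some (PySem.Chars.find l [':'] + 1)) = cs ++ [':'])
    ↔ (cs ++ [':']) <+: l := by
  constructor
  · rintro ⟨hin, hsl⟩
    have hf : 0 ≤ PySem.Chars.find l [':'] :=
      (PySem.Chars.find_nonneg_iff _ _).mpr ((PySem.Chars.isIn_iff_infix _ _).mp hin)
    rw [PySem.Chars.slice_eq_listSlice, PySem.List.slice_to l (by omega)] at hsl
    exact hsl ▸ List.take_prefix _ _
  · intro hpre
    obtain ⟨t, ht⟩ := hpre
    subst ht
    have hinf : [':'] <:+: cs ++ [':'] ++ t := ⟨cs, t, rfl⟩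
    have hf : 0 ≤ PySem.Chars.find (cs ++ [':'] ++ t) [':'] :=
      (PySem.Chars.find_nonneg_iff _ _).mpr hinf
    obtain ⟨hk1, hk2⟩ := PySem.Chars.find_spec hf
    set k := (PySem.Chars.find (cs ++ [':'] ++ t) [':']).toNat with hkdef
    have hle : k ≤ cs.length := by
      by_contra h
      push Not at h
      refine hk2 cs.length h ⟨t, ?_⟩
      rw [List.append_assoc]
      simp
    have hge : cs.length ≤ k := by
      by_contra h
      push Not at h
      obtain ⟨u, hu⟩ := hk1
      have h0 : ((cs ++ [':'] ++ t).drop k)[0]? = some ':' := by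
        rw [← hu]; rfl
      rw [List.getElem?_drop] at h0
      have h1 : (cs ++ [':'] ++ t)[k + 0]? = cs[k]? := by
        rw [List.append_assoc]
        simpa using List.getElem?_append_left (by omega)
      rw [h1, List.getElem?_eq_getElem (by omega)] at h0
      exact hc (Option.some_injective _ h0 ▸ List.getElem_mem _)
    have hk : k = cs.length := le_antisymm hle hge
    refine ⟨(PySem.Chars.isIn_iff_infix _ _).mpr hinf, ?_⟩
    rw [PySem.Chars.slice_eq_listSlice, PySem.List.slice_to (cs ++ [':'] ++ t) (by omega)]
    have h2 : (PySem.Chars.find (cs ++ [':'] ++ t) [':'] + 1).toNat = cs.length + 1 := by omega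
    rw [h2]
    have h3 : cs.length + 1 = (cs ++ [':']).length := by simp
    rw [h3, List.take_left]

lemma mem_foldl_present (ra : List String) (s0 : PySem.Set String) (x : String) :
    x ∈ ra.foldl (fun pres a =>
        if PySem.Str.isIn ":" a then PySem.Set.add pres (pvPref a) else pres) s0
    ↔ x ∈ s0 ∨ ∃ a ∈ ra, PySem.Str.isIn ":" a = true ∧ pvPref a = x := by
  induction ra generalizing s0 with
  | nil => simp
  | cons a t ih =>
    simp only [List.foldl_cons, ih, List.mem_cons]
    by_cases h : PySem.Str.isIn ":" a
    · simp only [h, if_true, PySem.Set.mem_add]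
      constructor
      · rintro (⟨hs | he⟩ | ⟨b, hb, hbin, hbp⟩)
        · exact Or.inl hs
        · exact Or.inr ⟨a, Or.inl rfl, h, he.symm⟩
        · exact Or.inr ⟨b, Or.inr hb, hbin, hbp⟩
      · rintro (hs | ⟨b, (rfl | hb), hbin, hbp⟩)
        · exact Or.inl (Or.inl hs)
        · exact Or.inl (Or.inr hbp.symm)
        · exact Or.inr ⟨b, hb, hbin, hbp⟩
    · rw [Bool.not_eq_true] at h
      simp only [h, Bool.false_eq_true, if_false]
      constructor
      · rintro (hs | ⟨b, hb, hbin, hbp⟩)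
        · exact Or.inl hs
        · exact Or.inr ⟨b, Or.inr hb, hbin, hbp⟩
      · rintro (hs | ⟨b, (rfl | hb), hbin, hbp⟩)
        · exact Or.inl hs
        · rw [h] at hbin; exact Bool.noConfusion hbin
        · exact Or.inr ⟨b, hb, hbin, hbp⟩

lemma present_iff (ra : List String) (p : String) (cs : List Char)
    (hp : p.toList = cs ++ [':']) (hc : ':' ∉ cs) :
    p ∈ pvPresentPrefixes ra ↔ ∃ a ∈ ra, PySem.Chars.startswith a.toList p.toList = true := by
  unfold pvPresentPrefixes
  rw [mem_foldl_present]
  have hempty : p ∉ (PySem.Set.empty : PySem.Set String) := by simp [PySem.Set.empty]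
  simp only [hempty, false_or]
  refine exists_congr fun a => and_congr_right fun _ => ?_
  rw [PySem.Chars.startswith_iff, hp, ← pvPref_eq_iff cs hc a.toList]
  unfold pvPref
  rw [PySem.Str.isIn_eq]
  constructor
  · rintro ⟨hin, hpr⟩
    refine ⟨by simpa using hin, ?_⟩
    have := congrArg String.toList hpr
    rw [PySem.Str.toList_slice, PySem.Str.find_eq, hp] at this
    simpa using this
  · rintro ⟨hin, hsl⟩
    refine ⟨by simpa using hin, ?_⟩
    apply String.toList_inj.mp
    rw [PySem.Str.toList_slice, PySem.Str.find_eq, hp]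
    simpa using hsl

lemma not_mem_present_empty (ra : List String) : "" ∉ pvPresentPrefixes ra := by
  intro h
  unfold pvPresentPrefixes at h
  rw [mem_foldl_present] at h
  rcases h with h | ⟨a, _, hin, hpr⟩
  · simp [PySem.Set.empty] at h
  · have hf : 0 ≤ PySem.Chars.find a.toList [':'] := by
      rw [PySem.Chars.find_nonneg_iff, ← PySem.Chars.isIn_iff_infix]
      simpa [PySem.Str.isIn_eq] using hin
    obtain ⟨hk1, _⟩ := PySem.Chars.find_spec hf
    obtain ⟨u, hu⟩ := hk1
    have hlen : (PySem.Chars.find a.toList [':']).toNat < a.toList.length := by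
      by_contra hge
      push Not at hge
      rw [List.drop_eq_nil_of_le hge] at hu
      simp at hu
    have := congrArg String.toList hpr
    unfold pvPref at this
    rw [PySem.Str.toList_slice, PySem.Str.find_eq] at this
    have hTL : (":" : String).toList = [':'] := rfl
    rw [hTL] at this
    rw [PySem.Chars.slice_eq_listSlice, PySem.List.slice_to a.toList (by omega)] at this
    have h2 : (PySem.Chars.find a.toList [':'] + 1).toNat
        = (PySem.Chars.find a.toList [':']).toNat + 1 := by omega
    rw [h2] at this
    have : a.toList.take ((PySem.Chars.find a.toList [':']).toNat + 1) = [] := by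
      simpa using this
    rcases List.take_eq_nil_iff.mp this with h | h
    · omega
    · rw [h] at hlen; simp at hlen

-- ===== VERDICT (by name: the statement is the Claim_ definition above) =====
theorem assets_impacted_by_errors_py_spec : Claim_equal_assets_impacted_by_errors_py := by
  intro ra es _
  unfold Spec_assets_impacted_by_errors_py assets_impacted_by_errors_py assets_impacted_by_errors_py_alt
  refine congrFun (congrFun (congrArg List.foldl ?_) PySem.Set.empty) es
  funext imp s
  by_cases h1 : s = "iam"
  · subst h1
    simp [pvServicePrefix, PySem.Dict.getD, PySem.Dict.get?, PySem.Set.contains,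
      present_iff ra "iam:" ['i','a','m'] rfl (by decide)]
  · by_cases h2 : s = "s3"
    · subst h2
      simp [pvServicePrefix, PySem.Dict.getD, PySem.Dict.get?, PySem.Set.contains,
        present_iff ra "s3:" ['s','3'] rfl (by decide)]
    · by_cases h3 : s = "ec2"
      · subst h3
        simp [pvServicePrefix, PySem.Dict.getD, PySem.Dict.get?, PySem.Set.contains,
          present_iff ra "ec2:" ['e','c','2'] rfl (by decide)]
      · by_cases h4 : s = "network"
        · subst h4
          simp [pvServicePrefix, PySem.Dict.getD, PySem.Dict.get?, PySem.Set.contains,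
            present_iff ra "ec2:" ['e','c','2'] rfl (by decide)]
        · by_cases h5 : s = "lambda"
          · subst h5
            simp [pvServicePrefix, PySem.Dict.getD, PySem.Dict.get?, PySem.Set.contains,
              present_iff ra "lambda:" ['l','a','m','b','d','a'] rfl (by decide)]
          · by_cases h6 : s = "rds"
            · subst h6
              simp [pvServicePrefix, PySem.Dict.getD, PySem.Dict.get?, PySem.Set.contains,
                present_iff ra "rds:" ['r','d','s'] rfl (by decide)]
            · have g : ∀ t : String, ¬ s = t → (t == s) = false := by
                intro t h
                simp only [beq_eq_false_iff_ne, ne_eq]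
                exact fun e => h e.symm
              simp [pvServicePrefix, PySem.Dict.getD, PySem.Dict.get?, PySem.Set.contains,
                h1, h2, h3, h4, h5, h6, g _ h1, g _ h2, g _ h3, g _ h4, g _ h5, g _ h6,
                not_mem_present_empty ra]
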